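-- pv_equiv track=rewrite | github.com/mathias-e-k/advent-of-code-solutions | 2023/day15.py | hash_algorithm_label
-- ===== SOURCE A (Python) =====
-- def hash_algorithm_label(_str : str):
--     current_value = 0
--     for c in _str:
--         if c in ["=", "-"]:
--             break
--         current_value += ord(c)
--         current_value *= 17
--         current_value %= 256
--     return current_value
-- ===== SOURCE B (Python) =====
-- def hash_algorithm_label(_str: str):
--     # collect the label prefix (chars before the first '=' or '-')
--     chars = []
--     for c in _str:
--         if c == "=" or c == "-":
--             break
--         chars.append(c)
--     m = len(chars)
--     # closed-form polynomial: char at index i has weight pow(17, m - i, 256)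
--     total = sum(ord(c) * pow(17, m - i, 256) for i, c in enumerate(chars))
--     return total % 256
-- ===== Notes on version B (the rewrite author's own statement) =====
-- stated objective: alternative
-- what changed: Replaces the running Horner-style accumulator (add ord, multiply by 17, mod 256 each step) with isolating the prefix before the first equals-sign or hyphen character and computing the hash as a closed-form weighted modular power sum, reduced mod 256 once at the end.
import Mathlib
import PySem

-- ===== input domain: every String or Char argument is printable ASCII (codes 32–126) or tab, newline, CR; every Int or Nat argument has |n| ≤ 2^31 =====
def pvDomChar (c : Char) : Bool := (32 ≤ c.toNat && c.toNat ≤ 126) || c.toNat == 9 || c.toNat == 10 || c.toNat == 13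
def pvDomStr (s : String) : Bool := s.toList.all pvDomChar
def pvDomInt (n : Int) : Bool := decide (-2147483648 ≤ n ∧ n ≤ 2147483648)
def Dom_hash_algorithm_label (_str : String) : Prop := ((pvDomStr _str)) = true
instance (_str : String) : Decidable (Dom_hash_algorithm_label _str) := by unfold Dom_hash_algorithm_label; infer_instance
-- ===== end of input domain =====

-- B replaces A's per-step accumulator (add ord, ×17, mod 256) with a closed-form
-- weighted modular power sum over the prefix before the first terminator, reduced mod 256 once.

-- ===== PORT A =====
-- the for-loop with break, carrying the running hash value
def hashALoop : List Char → Int → Int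
  | [], acc => acc
  | c :: cs, acc =>
    if c = '=' ∨ c = '-' then acc
    else hashALoop cs (PySem.Int.mod ((acc + (c.toNat : Int)) * 17) 256)

def hash_algorithm_label (_str : String) : Int := hashALoop _str.toList 0

-- ===== PORT B =====
-- the collecting loop with break (Source B's `chars`); pow(17, e, 256) is ported as 17 ^ e % 256 (exact)
def prefixB : List Char → List Char
  | [] => []
  | c :: cs => if c = '=' ∨ c = '-' then [] else c :: prefixB cs

def hash_algorithm_label_alt (_str : String) : Int :=
  let chars := prefixB _str.toList
  let m := chars.length
  let total := (PySem.List.enumerate chars).foldl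
    (fun acc p => acc + (p.2.toNat : Int) * (17 ^ (m - p.1.toNat) % 256)) 0
  PySem.Int.mod total 256

-- ===== PRECONDITION & SPEC =====
def Spec_hash_algorithm_label (_str : String) (out : Int) : Prop := out = hash_algorithm_label_alt _str
instance (_str : String) (out : Int) : Decidable (Spec_hash_algorithm_label _str out) := by unfold Spec_hash_algorithm_label; infer_instance

-- ===== CLAIM (what is proved, stated in full; the proofs are below) =====
def Claim_equal_hash_algorithm_label : Prop := ∀ (_str : String), Dom_hash_algorithm_label _str → Spec_hash_algorithm_label _str (hash_algorithm_label _str)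

-- ===== LEMMAS AND PROOFS =====

-- the weighted power sum, recursively: char heading a suffix of length n+1 has weight 17^(n+1)
def polyB : List Char → Int
  | [] => 0
  | c :: cs => (c.toNat : Int) * 17 ^ (cs.length + 1) + polyB cs

-- same sum but with each weight already reduced mod 256 (as Source B's pow(17, e, 256) does)
def polyC : List Char → Int
  | [] => 0
  | c :: cs => (c.toNat : Int) * (17 ^ (cs.length + 1) % 256) + polyC cs

theorem polyC_modeq (l : List Char) : polyC l ≡ polyB l [ZMOD 256] := by
  induction l with
  | nil => rfl
  | cons c cs ih =>
    have hw : ((17 : Int) ^ (cs.length + 1) % 256) ≡ 17 ^ (cs.length + 1) [ZMOD 256] :=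
      Int.emod_emod_of_dvd _ dvd_rfl
    exact (hw.mul_left _).add ih

theorem foldl_enum_polyB (l : List Char) (m : ℕ) : ∀ (s : ℕ) (acc : Int), s + l.length = m →
    (PySem.List.enumerate l (s : Int)).foldl
      (fun acc p => acc + (p.2.toNat : Int) * (17 ^ (m - p.1.toNat) % 256)) acc
    = acc + polyC l := by
  induction l with
  | nil => intro s acc _; simp [PySem.List.enumerate_nil, polyC]
  | cons c cs ih =>
    intro s acc h
    have hcast : ((s : Int) + 1) = ((s + 1 : ℕ) : Int) := by push_cast; ring
    have hm : m - s = cs.length + 1 := by simp at h; omega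
    rw [PySem.List.enumerate_cons, List.foldl_cons, hcast,
        ih (s + 1) _ (by simp at h ⊢; omega)]
    simp [polyC, hm]
    ring

theorem hashALoop_closed (l : List Char) : ∀ (acc : Int), 0 ≤ acc → acc < 256 →
    hashALoop l acc = (acc * 17 ^ (prefixB l).length + polyB (prefixB l)) % 256 := by
  induction l with
  | nil =>
    intro acc h0 h1
    simp [hashALoop, prefixB, polyB, Int.emod_eq_of_lt h0 h1]
  | cons c cs ih =>
    intro acc h0 h1
    by_cases hc : c = '=' ∨ c = '-'
    · simp [hashALoop, prefixB, hc, polyB, Int.emod_eq_of_lt h0 h1]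
    · have hmod : PySem.Int.mod ((acc + (c.toNat : Int)) * 17) 256
          = ((acc + (c.toNat : Int)) * 17) % 256 :=
        PySem.Int.mod_eq_emod_of_pos (by norm_num)
      have hb0 : 0 ≤ ((acc + (c.toNat : Int)) * 17) % 256 :=
        Int.emod_nonneg _ (by norm_num)
      have hb1 : ((acc + (c.toNat : Int)) * 17) % 256 < 256 :=
        Int.emod_lt_of_pos _ (by norm_num)
      rw [show hashALoop (c :: cs) acc
            = hashALoop cs (PySem.Int.mod ((acc + (c.toNat : Int)) * 17) 256) by
            simp [hashALoop, hc],
          hmod, ih _ hb0 hb1]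
      have hpre : prefixB (c :: cs) = c :: prefixB cs := by simp [prefixB, hc]
      rw [hpre]
      set x := (acc + (c.toNat : Int)) * 17 with hx
      set n := (prefixB cs).length
      have h1 : (x % 256) ≡ x [ZMOD 256] := Int.emod_emod_of_dvd _ dvd_rfl
      have h2 : (x % 256) * 17 ^ n + polyB (prefixB cs)
          ≡ x * 17 ^ n + polyB (prefixB cs) [ZMOD 256] :=
        (h1.mul_right _).add_right _
      have h3 := h2
      unfold Int.ModEq at h3
      rw [h3]
      congr 1
      simp [polyB, hx, pow_succ]
      ring

-- ===== VERDICT (by name: the statement is the Claim_ definition above) =====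
theorem hash_algorithm_label_spec : Claim_equal_hash_algorithm_label := by
  intro s _
  unfold Spec_hash_algorithm_label hash_algorithm_label hash_algorithm_label_alt
  rw [hashALoop_closed _ 0 le_rfl (by norm_num)]
  rw [PySem.Int.mod_eq_emod_of_pos (by norm_num)]
  have h := foldl_enum_polyB (prefixB s.toList) (prefixB s.toList).length 0 0 (by simp)
  simp only [Nat.cast_zero] at h
  rw [h]
  have hm := polyC_modeq (prefixB s.toList)
  unfold Int.ModEq at hm
  simp [hm]
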